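-- pv_equiv track=rewrite | github.com/lxqwind/GhostBits-WAF-Bypass-Toolkit | ghost_bits.py | ghost_encode
-- ===== SOURCE A (Python) =====
-- def find_ghost(ascii_cp: int, limit=40) -> list:
--     return [i for i in range(0x100, 0x10000) if (i & 0xFF) == ascii_cp][:limit]
--
-- def ghost_encode(text: str, blocked: list) -> str:
--     if not blocked:
--         return text
--     sorted_blocked = sorted(blocked, key=len, reverse=True)
--     result, i = [], 0
--     while i < len(text):
--         matched = next((b for b in sorted_blocked if text[i:i+len(b)] == b), None)
--         if matched:
--             for ch in matched:
--                 ghosts = find_ghost(ord(ch) & 0xFF)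
--                 result.append(chr(ghosts[0]) if ghosts else ch)
--             i += len(matched)
--         else:
--             result.append(text[i]); i += 1
--     return ''.join(result)
-- ===== SOURCE B (Python) =====
-- def ghost_encode(text: str, blocked: list) -> str:
--     if not blocked:
--         return text
--     pats = [b for b in sorted(blocked, key=len, reverse=True) if b]
--     out, i, n = [], 0, len(text)
--     while i < n:
--         best = None  # (position, pattern): earliest next occurrence, first pattern on ties
--         for p in pats:
--             j = text.find(p, i)
--             if j != -1 and (best is None or j < best[0]):
--                 best = (j, p)
--         if best is None:
--             out.append(text[i:])
--             break
--         j, p = best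
--         out.append(text[i:j])
--         out.append(''.join(chr(0x100 + (ord(c) & 0xFF)) for c in p))
--         i = j + len(p)
--     return ''.join(out)
-- ===== Notes on version B (the rewrite author's own statement) =====
-- stated objective: faster
-- what changed: Instead of testing every pattern at every text position (and scanning 65280 codepoint candidates per encoded character), B repeatedly uses str.find to jump directly to the earliest next occurrence of any (non-empty, length-sorted) blocked pattern, copies the gap verbatim, and encodes the match with direct chr(0x100+(ord(c)&0xFF)) arithmetic.
import Mathlib
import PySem

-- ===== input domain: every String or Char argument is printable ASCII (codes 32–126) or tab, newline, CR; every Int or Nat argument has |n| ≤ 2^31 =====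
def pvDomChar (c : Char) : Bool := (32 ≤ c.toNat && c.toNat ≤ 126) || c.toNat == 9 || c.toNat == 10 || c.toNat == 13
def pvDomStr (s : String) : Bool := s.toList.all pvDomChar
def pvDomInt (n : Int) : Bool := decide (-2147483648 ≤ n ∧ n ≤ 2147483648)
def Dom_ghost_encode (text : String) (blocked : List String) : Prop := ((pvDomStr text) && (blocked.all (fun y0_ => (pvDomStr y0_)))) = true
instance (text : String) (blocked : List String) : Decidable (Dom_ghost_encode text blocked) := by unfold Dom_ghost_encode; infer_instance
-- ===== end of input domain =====

-- B replaces A's position-by-position scan (and A's 65280-candidate ghost search per char) with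
-- repeated str.find jumps to the next occurrence and direct chr(0x100+cp) arithmetic; objective: faster.

-- ===== PORT A =====
-- [i for i in range(0x100, 0x10000) if (i & 0xFF) == ascii_cp][:limit]
def find_ghost (ascii_cp : Int) (limit : Int) : List Int :=
  PySem.List.slice ((PySem.List.pyRange 256 65536 1).filter
    (fun i => PySem.Int.band i 255 == ascii_cp)) none (some limit)

-- body of A's inner 'for ch in matched' loop: chr(ghosts[0]) if ghosts else ch
-- (Char.ofNat is exact for chr here: every value find_ghost returns at head is < 0x200)
def ghostCharA (ch : Char) : Char :=
  match find_ghost (PySem.Int.band ((ch.toNat : Int)) 255) 40 with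
  | g :: _ => Char.ofNat g.toNat
  | [] => ch

-- A's while-loop; matched'' (falsy) and None both take the else branch, as in Python
def ghostLoopA (sb : List (List Char)) (t : List Char) (res : List Char) (i : Nat) : List Char :=
  if h : i < t.length then
    match sb.find? (fun b => PySem.Chars.slice t (some (i : Int)) (some ((i : Int) + (b.length : Int))) == b) with
    | some (c :: m) => ghostLoopA sb t (res ++ (c :: m).map ghostCharA) (i + (c :: m).length)
    | _ => ghostLoopA sb t (res ++ [t[i]]) (i + 1)
  else res
termination_by t.length - i
decreasing_by
  · simp only [List.length_cons]; omega
  · omega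

def ghost_encode (text : String) (blocked : List String) : String :=
  if blocked = [] then text
  else String.ofList (ghostLoopA
    ((PySem.List.sorted blocked (fun b => PySem.Str.len b) true).map String.toList)
    text.toList [] 0)

-- ===== PORT B =====
-- chr(0x100 + (ord(c) & 0xFF))
def ghostCharB (c : Char) : Char :=
  Char.ofNat (256 + PySem.Int.band ((c.toNat : Int)) 255).toNat

-- body of B's 'for p in pats' loop: keep the earliest next occurrence (first pattern wins ties)
def bestFind (t : List Char) (i : Nat) (best : Option (Int × List Char)) (p : List Char) :
    Option (Int × List Char) :=
  let j := PySem.Chars.findFrom t p (i : Int)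
  if (j != -1) && (match best with | none => true | some q => decide (j < q.1)) then some (j, p)
  else best

-- cited by ghostLoopB's decreasing_by: where the fold's result can come from
theorem foldl_bestFind_origin (t : List Char) (i : Nat) :
    ∀ (pats : List (List Char)) (best : Option (Int × List Char)) (j : Int) (p : List Char),
      pats.foldl (bestFind t i) best = some (j, p) →
      best = some (j, p) ∨ (p ∈ pats ∧ j = PySem.Chars.findFrom t p (i : Int) ∧ j ≠ -1) := by
  intro pats
  induction pats with
  | nil => intro best j p h; exact Or.inl h
  | cons q rest ih =>
    intro best j p h
    rcases ih _ _ _ h with h' | h'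
    · rcases best with _ | q0 <;> simp only [bestFind] at h' <;> split at h'
      · obtain ⟨h1, h2⟩ := Prod.mk.inj (Option.some.inj h')
        subst h2; subst h1
        rename_i hcond
        simp only [Bool.and_eq_true, bne_iff_ne, ne_eq] at hcond
        exact Or.inr ⟨List.mem_cons_self, rfl, hcond.1⟩
      · exact absurd h' (by simp)
      · obtain ⟨h1, h2⟩ := Prod.mk.inj (Option.some.inj h')
        subst h2; subst h1
        rename_i hcond
        simp only [Bool.and_eq_true, bne_iff_ne, ne_eq] at hcond
        exact Or.inr ⟨List.mem_cons_self, rfl, hcond.1⟩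
      · exact Or.inl h'
    · exact Or.inr ⟨List.mem_cons_of_mem _ h'.1, h'.2⟩

-- cited by ghost_encode_alt: B's filtered pattern list has no empty pattern
theorem pats_nonempty (blocked : List String) :
    ∀ p ∈ ((PySem.List.sorted blocked (fun b => PySem.Str.len b) true).filter
        (fun b => !(b == ""))).map String.toList, p ≠ [] := by
  intro p hp
  simp only [List.mem_map, List.mem_filter] at hp
  obtain ⟨b, ⟨_, hb⟩, rfl⟩ := hp
  simp only [Bool.not_eq_eq_eq_not, Bool.not_true, beq_eq_false_iff_ne, ne_eq] at hb
  exact fun hnil => hb (String.toList_eq_nil_iff.mp hnil)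

-- B's while-loop: jump to the earliest next occurrence, copy the gap, encode, continue after it
def ghostLoopB (t : List Char) (pats : List (List Char)) (hp : ∀ p ∈ pats, p ≠ [])
    (out : List Char) (i : Nat) : List Char :=
  if h : i < t.length then
    match hb : pats.foldl (bestFind t i) none with
    | none => out ++ PySem.Chars.slice t (some (i : Int)) none
    | some (j, p) =>
        ghostLoopB t pats hp
          (out ++ PySem.Chars.slice t (some (i : Int)) (some j) ++ p.map ghostCharB)
          (j.toNat + p.length)
  else out
termination_by t.length - i
decreasing_by
  rcases foldl_bestFind_origin t i pats none j p hb with h0 | ⟨hmem, hje, hne⟩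
  · exact absurd h0 (by simp)
  · obtain ⟨h1, h2, -⟩ := PySem.Chars.findFrom_natCast_spec t p i (le_of_lt h) (hje ▸ hne)
    have hp1 : p ≠ [] := hp p hmem
    have hlen : 1 ≤ p.length := List.length_pos_iff.mpr hp1
    have hl : p.length ≤ (List.drop (PySem.Chars.findFrom t p (i : Int)).toNat t).length :=
      h2.length_le
    rw [List.length_drop] at hl
    rw [hje] at *
    omega

def ghost_encode_alt (text : String) (blocked : List String) : String :=
  if blocked = [] then text
  else String.ofList (ghostLoopB text.toList
    (((PySem.List.sorted blocked (fun b => PySem.Str.len b) true).filter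
        (fun b => !(b == ""))).map String.toList)
    (pats_nonempty blocked) [] 0)

-- ===== PRECONDITION & SPEC =====
def Spec_ghost_encode (text : String) (blocked : List String) (out : String) : Prop := out = ghost_encode_alt text blocked
instance (text : String) (blocked : List String) (out : String) : Decidable (Spec_ghost_encode text blocked out) := by unfold Spec_ghost_encode; infer_instance

-- ===== CLAIM (what is proved, stated in full; the proofs are below) =====
def Claim_equal_ghost_encode : Prop := ∀ (text : String) (blocked : List String), Dom_ghost_encode text blocked → Spec_ghost_encode text blocked (ghost_encode text blocked)

-- ===== LEMMAS AND PROOFS =====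

theorem and255_eq_mod (n : Nat) : n &&& 255 = n % 256 := by
  apply Nat.eq_of_testBit_eq; intro i
  simp only [Nat.testBit_and]
  rw [show (256:Nat) = 2^8 from rfl, Nat.testBit_mod_two_pow,
      show (255:Nat) = 2^8-1 from rfl, Nat.testBit_two_pow_sub_one]
  exact Bool.and_comm _ _

-- head of a filtered integer range: the first element satisfying the predicate
theorem filter_pyRange_head (pr : Int → Bool) :
    ∀ (n : Nat) (a b x : Int), (x - a).toNat ≤ n → a ≤ x → x < b → pr x = true →
      (∀ y, a ≤ y → y < x → pr y = false) →
      ((PySem.List.pyRange a b 1).filter pr).head? = some x := by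
  intro n
  induction n with
  | zero =>
    intro a b x h0 hax hxb hx hmin
    have hxa : x = a := by omega
    subst hxa
    rw [PySem.List.pyRange_one_cons (by omega)]
    simp [hx]
  | succ n ih =>
    intro a b x h0 hax hxb hx hmin
    by_cases hxa : x = a
    · subst hxa
      rw [PySem.List.pyRange_one_cons (by omega)]
      simp [hx]
    · rw [PySem.List.pyRange_one_cons (by omega)]
      have hpa : pr a = false := hmin a le_rfl (by omega)
      simp only [List.filter_cons, hpa, Bool.false_eq_true, if_false]
      exact ih (a + 1) b x (by omega) (by omega) hxb hx
        (fun y hy hyx => hmin y (by omega) hyx)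

theorem band255_eq (y : Int) (hy : 0 ≤ y) :
    PySem.Int.band y 255 = ((y.toNat % 256 : Nat) : Int) := by
  rw [PySem.Int.band_of_nonneg hy (by norm_num), show (255 : Int).toNat = 255 from rfl,
    and255_eq_mod]

theorem ghostCharA_eq (c : Char) : ghostCharA c = ghostCharB c := by
  obtain ⟨cp, hcp, hlt⟩ : ∃ cp : Nat, PySem.Int.band ((c.toNat : Int)) 255 = (cp : Int) ∧ cp < 256 := by
    refine ⟨c.toNat % 256, ?_, by omega⟩
    rw [band255_eq _ (by positivity)]
    simp
  have hhead : (((PySem.List.pyRange 256 65536 1).filter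
      (fun i => PySem.Int.band i 255 == (cp : Int))).head?) = some (((256 + cp : Nat) : Int)) := by
    apply filter_pyRange_head _ cp 256 65536 (((256 + cp : Nat) : Int)) (by omega) (by omega) (by omega)
    · rw [band255_eq _ (by positivity)]
      simp only [beq_iff_eq, Int.natCast_inj]
      omega
    · intro y h1 h2
      rw [band255_eq _ (by omega)]
      simp only [beq_eq_false_iff_ne, ne_eq, Int.natCast_inj]
      omega
  obtain ⟨g, tl, hl, hg⟩ : ∃ g tl, ((PySem.List.pyRange 256 65536 1).filter
      (fun i => PySem.Int.band i 255 == (cp : Int))) = g :: tl ∧ g = ((256 + cp : Nat) : Int) := by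
    rcases hfl : ((PySem.List.pyRange 256 65536 1).filter
        (fun i => PySem.Int.band i 255 == (cp : Int))) with _ | ⟨g, tl⟩
    · rw [hfl] at hhead; simp at hhead
    · rw [hfl] at hhead
      simp only [List.head?_cons, Option.some.injEq] at hhead
      exact ⟨g, tl, rfl, hhead⟩
  unfold ghostCharA ghostCharB find_ghost
  rw [hcp, hl]
  have hsl : PySem.List.slice (g :: tl) none (some (40 : Int)) = g :: tl.take 39 :=
    PySem.List.slice_to (g :: tl) (by norm_num)
  rw [hsl]
  show Char.ofNat g.toNat = _
  rw [hg]
  congr 1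

-- the common specification: scan the text, at each position take the first pattern that is a
-- prefix there (patterns all nonempty), encode it and jump, else copy one character
def gspec (pats : List (List Char)) (s : List Char) : List Char :=
  match s with
  | [] => []
  | c :: s' =>
    match pats.find? (fun p => decide (p <+: (c :: s'))) with
    | some (q :: m) => (q :: m).map ghostCharB ++ gspec pats ((c :: s').drop (q :: m).length)
    | _ => c :: gspec pats s'
termination_by s.length
decreasing_by
  · simp only [List.length_drop, List.length_cons]; omega
  · simp

theorem gspec_cons_of_find (pats : List (List Char)) (c : Char) (s' : List Char) (q : Char)
    (m : List Char) (hfind : pats.find? (fun p => decide (p <+: (c :: s'))) = some (q :: m)) :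
    gspec pats (c :: s') = (q :: m).map ghostCharB ++ gspec pats ((c :: s').drop (q :: m).length) := by
  rw [gspec, hfind]

theorem gspec_cons_of_find_other (pats : List (List Char)) (c : Char) (s' : List Char)
    (hfind : pats.find? (fun p => decide (p <+: (c :: s'))) = none ∨
      pats.find? (fun p => decide (p <+: (c :: s'))) = some []) :
    gspec pats (c :: s') = c :: gspec pats s' := by
  rcases hfind with hfind | hfind <;> rw [gspec, hfind]

theorem gspec_copy (pats : List (List Char)) :
    ∀ (s : List Char), (∀ p ∈ pats, ∀ k, ¬ p <+: s.drop k) → gspec pats s = s := by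
  intro s
  induction s with
  | nil => intro _; rw [gspec]
  | cons c s' ih =>
    intro h
    have hf : pats.find? (fun p => decide (p <+: (c :: s'))) = none := by
      rw [List.find?_eq_none]
      intro p hp
      simpa using h p hp 0
    rw [gspec_cons_of_find_other pats c s' (Or.inl hf)]
    exact congrArg (c :: ·) (ih (fun p hp k => by simpa using h p hp (k + 1)))

theorem gspec_skip (pats : List (List Char)) (p : List Char) (hnil : ∀ p ∈ pats, p ≠ []) :
    ∀ (d : Nat) (s : List Char),
      (∀ k, k < d → ∀ q ∈ pats, ¬ q <+: s.drop k) →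
      pats.find? (fun q => decide (q <+: s.drop d)) = some p →
      gspec pats s = s.take d ++ p.map ghostCharB ++ gspec pats (s.drop (d + p.length)) := by
  intro d
  induction d with
  | zero =>
    intro s hno hfind
    simp only [List.drop_zero] at hfind
    have hpmem : p ∈ pats := List.mem_of_find?_eq_some hfind
    have hppre : p <+: s := by simpa using List.find?_some hfind
    obtain ⟨q, m, rfl⟩ : ∃ q m, p = q :: m := by
      rcases p with _ | ⟨q, m⟩
      · exact absurd rfl (hnil _ hpmem)
      · exact ⟨q, m, rfl⟩
    obtain ⟨c, s', rfl⟩ : ∃ c s', s = c :: s' := by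
      rcases s with _ | ⟨c, s'⟩
      · simp at hppre
      · exact ⟨c, s', rfl⟩
    rw [gspec_cons_of_find pats c s' q m hfind]
    simp
  | succ d ih =>
    intro s hno hfind
    obtain ⟨c, s', rfl⟩ : ∃ c s', s = c :: s' := by
      rcases s with _ | ⟨c, s'⟩
      · exfalso
        have hpmem := List.mem_of_find?_eq_some hfind
        have hpre : p <+: [] := by simpa using List.find?_some hfind
        exact hnil p hpmem (List.prefix_nil.mp hpre)
      · exact ⟨c, s', rfl⟩
    have hf0 : pats.find? (fun q => decide (q <+: (c :: s'))) = none := by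
      rw [List.find?_eq_none]
      intro q hq
      simpa using hno 0 (Nat.succ_pos d) q hq
    rw [gspec_cons_of_find_other pats c s' (Or.inl hf0)]
    rw [ih s' (fun k hk q hq => by simpa using hno (k + 1) (by omega) q hq)
        (by simpa using hfind)]
    simp only [List.take_succ_cons, List.cons_append]
    rw [show d + 1 + p.length = (d + p.length) + 1 from by omega, List.drop_succ_cons]

-- what the bestFind fold computes
def GoodState (t : List Char) (i : Nat) (l : List (List Char)) (best : Option (Int × List Char)) : Prop :=
  (best = none ∧ ∀ q ∈ l, PySem.Chars.findFrom t q (i : Int) = -1) ∨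
  (∃ j p l₁ l₂, best = some (j, p) ∧ l = l₁ ++ p :: l₂ ∧
     PySem.Chars.findFrom t p (i : Int) = j ∧ j ≠ -1 ∧
     (∀ q ∈ l₁, PySem.Chars.findFrom t q (i : Int) = -1 ∨ j < PySem.Chars.findFrom t q (i : Int)) ∧
     (∀ q ∈ l₂, PySem.Chars.findFrom t q (i : Int) = -1 ∨ j ≤ PySem.Chars.findFrom t q (i : Int)))

theorem goodState_step (t : List Char) (i : Nat) (l : List (List Char))
    (best : Option (Int × List Char)) (q : List Char) (h : GoodState t i l best) :
    GoodState t i (l ++ [q]) (bestFind t i best q) := by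
  rcases h with ⟨hb, hall⟩ | ⟨j, p, l₁, l₂, hb, hl, hF, hne, h1, h2⟩
  · subst hb
    by_cases hq : PySem.Chars.findFrom t q (i : Int) = -1
    · simp only [bestFind, hq]
      norm_num
      refine Or.inl ⟨rfl, ?_⟩
      intro r hr
      rcases List.mem_append.mp hr with hr | hr
      · exact hall r hr
      · rw [List.mem_singleton.mp hr]; exact hq
    · simp only [bestFind]
      rw [if_pos (by simp [hq])]
      refine Or.inr ⟨PySem.Chars.findFrom t q (i : Int), q, l, [], rfl, rfl, rfl, hq,
        fun r hr => Or.inl (hall r hr), by simp⟩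
  · subst hb; subst hl
    by_cases hcond : PySem.Chars.findFrom t q (i : Int) ≠ -1 ∧ PySem.Chars.findFrom t q (i : Int) < j
    · simp only [bestFind]
      rw [if_pos (by simp [hcond.1, hcond.2])]
      refine Or.inr ⟨PySem.Chars.findFrom t q (i : Int), q, l₁ ++ p :: l₂, [], rfl, by simp, rfl,
        hcond.1, ?_, by simp⟩
      intro r hr
      rcases List.mem_append.mp hr with hr | hr
      · rcases h1 r hr with hr1 | hr1
        · exact Or.inl hr1
        · exact Or.inr (by omega)
      · rcases List.mem_cons.mp hr with hr1 | hr1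
        · subst hr1; exact Or.inr (by omega)
        · rcases h2 r hr1 with hr2 | hr2
          · exact Or.inl hr2
          · exact Or.inr (by omega)
    · simp only [bestFind]
      rw [if_neg (by
        simp only [Bool.and_eq_true, bne_iff_ne, ne_eq, decide_eq_true_eq, not_and]
        intro hne2
        rcases not_and_or.mp hcond with hc | hc
        · exact absurd hne2 (by simpa using hc)
        · omega)]
      refine Or.inr ⟨j, p, l₁, l₂ ++ [q], rfl, by simp, hF, hne, h1, ?_⟩
      intro r hr
      rcases List.mem_append.mp hr with hr | hr
      · exact h2 r hr
      · rw [List.mem_singleton.mp hr]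
        rcases not_and_or.mp hcond with hc | hc
        · exact Or.inl (by simpa using hc)
        · exact Or.inr (by omega)

theorem goodState_foldl (t : List Char) (i : Nat) (pats : List (List Char)) :
    GoodState t i pats (pats.foldl (bestFind t i) none) := by
  induction pats using List.reverseRecOn with
  | nil => exact Or.inl ⟨rfl, by simp⟩
  | append_singleton l q ih =>
    rw [List.foldl_append]
    simp only [List.foldl_cons, List.foldl_nil]
    exact goodState_step t i l _ q ih

-- A's slice-equality test is the prefix test
theorem testA_eq (t b : List Char) (i : Nat) :
    (PySem.Chars.slice t (some (i : Int)) (some ((i : Int) + (b.length : Int))) == b)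
      = decide (b <+: t.drop i) := by
  rw [PySem.Chars.slice_eq_listSlice, PySem.List.slice_natCast_add]
  rw [Bool.eq_iff_iff]
  simp only [beq_iff_eq, decide_eq_true_eq]
  rw [List.prefix_iff_eq_take]
  exact eq_comm

-- a list sorted by descending length is its nonempty elements followed by its empty ones
theorem split_empties :
    ∀ (l : List (List Char)), l.Pairwise (fun a b => b.length ≤ a.length) →
      ∃ l₁ l₂, l = l₁ ++ l₂ ∧ l₁ = l.filter (fun p => !p.isEmpty) ∧
        (∀ p ∈ l₁, p ≠ []) ∧ (∀ p ∈ l₂, p = []) := by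
  intro l hl
  induction l with
  | nil => exact ⟨[], [], rfl, rfl, by simp, by simp⟩
  | cons c l ih =>
    rw [List.pairwise_cons] at hl
    obtain ⟨hc, hl'⟩ := hl
    by_cases hce : c = []
    · subst hce
      have hall : ∀ b ∈ l, b = [] := fun b hb =>
        List.length_eq_zero_iff.mp (Nat.le_zero.mp (hc b hb))
      refine ⟨[], [] :: l, rfl, ?_, by simp, ?_⟩
      · rw [eq_comm, List.filter_eq_nil_iff]
        intro a ha
        rcases List.mem_cons.mp ha with ha | ha
        · subst ha; simp
        · simp [hall a ha]
      · intro p hp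
        rcases List.mem_cons.mp hp with hp | hp
        · exact hp
        · exact hall p hp
    · obtain ⟨l₁, l₂, heq, hfilt, hne, hemp⟩ := ih hl'
      refine ⟨c :: l₁, l₂, by simp [heq], ?_, ?_, hemp⟩
      · rw [List.filter_cons, if_pos (by simp [hce]), ← hfilt]
      · intro p hp
        rcases List.mem_cons.mp hp with hp | hp
        · subst hp; exact hce
        · exact hne p hp

theorem no_prefix_of_not_infix {p s : List Char} (h : ¬ p <:+: s) :
    ∀ k, ¬ p <+: s.drop k := by
  intro k hk
  exact h (hk.isInfix.trans (List.drop_suffix k s).isInfix)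

theorem loopA_eq (t : List Char) (pats l₂ : List (List Char))
    (hne : ∀ p ∈ pats, p ≠ []) (hemp : ∀ p ∈ l₂, p = []) :
    ∀ (n i : Nat) (res : List Char), t.length - i ≤ n →
      ghostLoopA (pats ++ l₂) t res i = res ++ gspec pats (t.drop i) := by
  intro n
  induction n with
  | zero =>
    intro i res hn
    rw [ghostLoopA, dif_neg (by omega), List.drop_eq_nil_of_le (by omega)]
    rw [show gspec pats [] = [] from by rw [gspec]]
    simp
  | succ n ih =>
    intro i res hn
    by_cases h : i < t.length
    · rw [ghostLoopA, dif_pos h]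
      have hpred : (fun b : List Char =>
          PySem.Chars.slice t (some (i : Int)) (some ((i : Int) + (b.length : Int))) == b)
          = (fun b => decide (b <+: t.drop i)) := funext fun b => testA_eq t b i
      cases hf1 : pats.find? (fun b => decide (b <+: t.drop i)) with
      | some p =>
        have hfull : (pats ++ l₂).find?
            (fun b => PySem.Chars.slice t (some (i : Int)) (some ((i : Int) + (b.length : Int))) == b)
            = some p := by
          rw [hpred, List.find?_append, hf1, Option.some_or]
        obtain ⟨c, m, rfl⟩ : ∃ c m, p = c :: m := by
          rcases p with _ | ⟨c, m⟩
          · exact absurd rfl (hne _ (List.mem_of_find?_eq_some hf1))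
          · exact ⟨c, m, rfl⟩
        rw [hfull]
        show ghostLoopA (pats ++ l₂) t (res ++ (c :: m).map ghostCharA) (i + (c :: m).length)
            = res ++ gspec pats (t.drop i)
        rw [ih (i + (c :: m).length) (res ++ (c :: m).map ghostCharA)
            (by simp only [List.length_cons]; omega)]
        have hskip := gspec_skip pats (c :: m) hne 0 (t.drop i)
          (fun k hk => absurd hk (Nat.not_lt_zero k)) (by simpa using hf1)
        rw [hskip,
          show (c :: m).map ghostCharA = (c :: m).map ghostCharB from
            List.map_congr_left (fun x _ => ghostCharA_eq x)]
        simp [List.drop_drop, List.append_assoc]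
      | none =>
        have hl2v : l₂.find? (fun b => decide (b <+: t.drop i)) = none ∨
            l₂.find? (fun b => decide (b <+: t.drop i)) = some [] := by
          rcases l₂ with _ | ⟨e, l₂'⟩
          · exact Or.inl rfl
          · right
            rw [hemp e List.mem_cons_self, List.find?_cons_of_pos (by simp)]
        have hfull : (pats ++ l₂).find?
            (fun b => PySem.Chars.slice t (some (i : Int)) (some ((i : Int) + (b.length : Int))) == b)
            = l₂.find? (fun b => decide (b <+: t.drop i)) := by
          rw [hpred, List.find?_append, hf1, Option.none_or]
        have hstep : res ++ gspec pats (t.drop i)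
            = ghostLoopA (pats ++ l₂) t (res ++ [t[i]]) (i + 1) := by
          rw [ih (i + 1) (res ++ [t[i]]) (by omega)]
          have hcons := List.drop_eq_getElem_cons h
          rw [hcons, gspec_cons_of_find_other pats t[i] (t.drop (i + 1))
            (Or.inl (hcons ▸ hf1))]
          simp
        rcases hl2v with hv | hv
        · rw [hfull, hv]
          show ghostLoopA (pats ++ l₂) t (res ++ [t[i]]) (i + 1) = res ++ gspec pats (t.drop i)
          rw [hstep]
        · rw [hfull, hv]
          show ghostLoopA (pats ++ l₂) t (res ++ [t[i]]) (i + 1) = res ++ gspec pats (t.drop i)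
          rw [hstep]
    · rw [ghostLoopA, dif_neg h, List.drop_eq_nil_of_le (by omega)]
      rw [show gspec pats [] = [] from by rw [gspec]]
      simp

theorem loopB_eq (t : List Char) (pats : List (List Char)) (hne : ∀ p ∈ pats, p ≠ []) :
    ∀ (n i : Nat) (out : List Char), t.length - i ≤ n → i ≤ t.length →
      ghostLoopB t pats hne out i = out ++ gspec pats (t.drop i) := by
  intro n
  induction n with
  | zero =>
    intro i out hn hle
    rw [ghostLoopB, dif_neg (by omega), List.drop_eq_nil_of_le (by omega)]
    rw [show gspec pats [] = [] from by rw [gspec]]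
    simp
  | succ n ih =>
    intro i out hn hle
    by_cases h : i < t.length
    · have hgood := goodState_foldl t i pats
      rw [ghostLoopB, dif_pos h]
      split
      · rename_i heq
        rcases hgood with ⟨_, hall⟩ | ⟨j, p, l₁, l₂, hb2, _⟩
        · have hcopy : gspec pats (t.drop i) = t.drop i :=
            gspec_copy pats _ (fun p hp k => no_prefix_of_not_infix
              ((PySem.Chars.findFrom_natCast_eq_neg_one_iff t p i (le_of_lt h)).mp (hall p hp)) k)
          rw [hcopy, PySem.Chars.slice_eq_listSlice, PySem.List.slice_from_natCast]
        · rw [heq] at hb2; exact absurd hb2 (by simp)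
      · rename_i j p heq
        rcases hgood with ⟨hb2, _⟩ | ⟨j', p', l₁, l₂, hb2, hl, hF, hFne, h1, h2⟩
        · rw [heq] at hb2; exact absurd hb2 (by simp)
        rw [heq] at hb2
        obtain ⟨h1', h2'⟩ := Prod.mk.inj (Option.some.inj hb2)
        subst h1'; subst h2'
        obtain ⟨hij, hpre, hmin⟩ := hF ▸ PySem.Chars.findFrom_natCast_spec t p i (le_of_lt h) (hF ▸ hFne)
        have hj0 : (0 : Int) ≤ j := le_trans (Int.natCast_nonneg i) hij
        have hidj : i ≤ j.toNat := by omega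
        have hplen : 1 ≤ p.length :=
          List.length_pos_iff.mpr (hne p (hl ▸ List.mem_append.mpr (Or.inr List.mem_cons_self)))
        have hjlen : j.toNat + p.length ≤ t.length := by
          have := hpre.length_le
          rw [List.length_drop] at this
          omega
        have hFq_bound : ∀ q ∈ pats, PySem.Chars.findFrom t q (i : Int) = -1 ∨
            j ≤ PySem.Chars.findFrom t q (i : Int) := by
          intro q hq
          rw [hl] at hq
          rcases List.mem_append.mp hq with hq | hq
          · rcases h1 q hq with hq1 | hq1
            · exact Or.inl hq1
            · exact Or.inr (le_of_lt hq1)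
          · rcases List.mem_cons.mp hq with hq1 | hq1
            · subst hq1; exact Or.inr (le_of_eq hF.symm)
            · exact h2 q hq1
        have hnomatch : ∀ k, i ≤ k → k < j.toNat → ∀ q ∈ pats, ¬ q <+: t.drop k := by
          intro k hk1 hk2 q hq
          rcases hFq_bound q hq with hq1 | hq1
          · intro hcontra
            have hdk : (t.drop i).drop (k - i) = t.drop k := by
              rw [List.drop_drop]; try (congr 1; omega)
            exact no_prefix_of_not_infix
              ((PySem.Chars.findFrom_natCast_eq_neg_one_iff t q i (le_of_lt h)).mp hq1) (k - i)
              (hdk ▸ hcontra)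
          · have hqne : PySem.Chars.findFrom t q (i : Int) ≠ -1 := by omega
            obtain ⟨-, -, hqmin⟩ := PySem.Chars.findFrom_natCast_spec t q i (le_of_lt h) hqne
            exact hqmin k hk1 (by omega)
        have hdrop_d : (t.drop i).drop (j.toNat - i) = t.drop j.toNat := by
          rw [List.drop_drop]; try (congr 1; omega)
        have hfind : pats.find? (fun q => decide (q <+: (t.drop i).drop (j.toNat - i))) = some p := by
          rw [hdrop_d, hl, List.find?_append]
          have hl1 : l₁.find? (fun q => decide (q <+: t.drop j.toNat)) = none := by
            rw [List.find?_eq_none]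
            intro q hq
            simp only [decide_eq_true_eq]
            rcases h1 q hq with hq1 | hq1
            · intro hcontra
              exact no_prefix_of_not_infix
                ((PySem.Chars.findFrom_natCast_eq_neg_one_iff t q i (le_of_lt h)).mp hq1)
                (j.toNat - i) (hdrop_d ▸ hcontra)
            · have hqne : PySem.Chars.findFrom t q (i : Int) ≠ -1 := by omega
              obtain ⟨-, -, hqmin⟩ := PySem.Chars.findFrom_natCast_spec t q i (le_of_lt h) hqne
              exact hqmin j.toNat hidj (by omega)
          rw [hl1, Option.none_or, List.find?_cons_of_pos (by simpa using hpre)]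
        have hno : ∀ k, k < j.toNat - i → ∀ q ∈ pats, ¬ q <+: (t.drop i).drop k := by
          intro k hk q hq
          have hdk : (t.drop i).drop k = t.drop (i + k) := by
            rw [List.drop_drop]
          rw [hdk]
          exact hnomatch (i + k) (by omega) (by omega) q hq
        have hskip := gspec_skip pats p hne (j.toNat - i) (t.drop i) hno hfind
        rw [ih (j.toNat + p.length) _ (by omega) (by omega)]
        rw [hskip]
        have hslice : PySem.Chars.slice t (some (i : Int)) (some j) = (t.drop i).take (j.toNat - i) := by
          rw [PySem.Chars.slice_eq_listSlice,
            show (some j) = some ((i : Int) + ((j.toNat - i : Nat) : Int)) from by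
              congr 1; omega,
            PySem.List.slice_natCast_add]
        have hdropfin : (t.drop i).drop (j.toNat - i + p.length) = t.drop (j.toNat + p.length) := by
          rw [List.drop_drop]; try (congr 1; omega)
        rw [hslice, hdropfin]
        simp [List.append_assoc]
    · rw [ghostLoopB, dif_neg h, List.drop_eq_nil_of_le (by omega)]
      rw [show gspec pats [] = [] from by rw [gspec]]
      simp

-- ===== VERDICT (by name: the statement is the Claim_ definition above) =====
theorem ghost_encode_spec : Claim_equal_ghost_encode := by
  intro text blocked _
  unfold Spec_ghost_encode ghost_encode ghost_encode_alt
  by_cases hb : blocked = []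
  · simp [hb]
  · rw [if_neg hb, if_neg hb]
    congr 1
    have hpair : ((PySem.List.sorted blocked (fun b => PySem.Str.len b) true).map
        String.toList).Pairwise (fun a b => b.length ≤ a.length) := by
      rw [List.pairwise_map]
      refine (PySem.List.sorted_pairwise_rev blocked (fun b => PySem.Str.len b)).imp ?_
      intro a b hab
      simp only [PySem.Str.len_eq] at hab
      exact_mod_cast hab
    obtain ⟨l₁, l₂, hsplit, hfilt, hne, hemp⟩ := split_empties _ hpair
    have hpats : (((PySem.List.sorted blocked (fun b => PySem.Str.len b) true).filter
        (fun b => !(b == ""))).map String.toList) = l₁ := by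
      rw [hfilt, List.filter_map]
      congr 1
      apply List.filter_congr
      intro b _
      by_cases hbe : b = ""
      · subst hbe; simp
      · rw [Bool.eq_iff_iff]
        simp [hbe, String.toList_eq_nil_iff]
    rw [hsplit, loopA_eq text.toList l₁ l₂ hne hemp text.toList.length 0 [] (by omega),
      loopB_eq text.toList _ (pats_nonempty blocked) text.toList.length 0 [] (by omega) (by omega),
      hpats]
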